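-- pv_equiv track=rewrite | github.com/AyushAgnihotri2025/CP-Solutions | LeetCode/Python3/Medium/2838. Sum of Matrix After Queries/2838-sum-of-matrix-after-queries.py | matrixSumQueries
-- ===== SOURCE A (Python) =====
-- from typing import List
--
-- def matrixSumQueries(n: int, queries: List[List[int]]) -> int:
--     rowSeenCount, colSeenCount, total = 0, 0, 0
--     rowSeen, colSeen = [False] * n, [False] * n
--     for qi in range(len(queries) - 1, -1, -1):
--         typei, index, val = queries[qi][0], queries[qi][1], queries[qi][2]
--         if typei == 0 and not rowSeen[index]:
--             rowSeenCount += 1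
--             rowSeen[index] = True
--             total += (n - colSeenCount) * val
--         if typei == 1 and not colSeen[index]:
--             colSeenCount += 1
--             colSeen[index] = True
--             total += (n - rowSeenCount) * val
--     return total
-- ===== SOURCE B (Python) =====
-- from typing import List
--
-- def matrixSumQueries(n: int, queries: List[List[int]]) -> int:
--     # record, per row and per column, the position of the last write to it
--     lastRow = [None] * n
--     lastCol = [None] * n
--     for pos in range(len(queries)):
--         t, idx = queries[pos][0], queries[pos][1]
--         if t == 0:
--             lastRow[idx] = pos
--         elif t == 1:
--             lastCol[idx] = pos
--     # replay the surviving writes from latest to earliest, counting how many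
--     # rows/columns a later write has already claimed
--     total, rowCnt, colCnt = 0, 0, 0
--     for pos in sorted((p for p in lastRow + lastCol if p is not None), reverse=True):
--         t, val = queries[pos][0], queries[pos][2]
--         if t == 0:
--             total += (n - colCnt) * val
--             rowCnt += 1
--         else:
--             total += (n - rowCnt) * val
--             colCnt += 1
--     return total
-- ===== Notes on version B (the rewrite author's own statement) =====
-- stated objective: alternative
-- what changed: B replaces A's reverse scan with seen-boolean arrays by a forward pass recording the last write position per row/column in two arrays, then a second pass over the surviving positions sorted in descending order maintaining only two counters; Pre_ excludes exactly the inputs where A raises IndexError (a query with fewer than three entries, or a type-0/1 query whose index is outside [-n, n)).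
import Mathlib
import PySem

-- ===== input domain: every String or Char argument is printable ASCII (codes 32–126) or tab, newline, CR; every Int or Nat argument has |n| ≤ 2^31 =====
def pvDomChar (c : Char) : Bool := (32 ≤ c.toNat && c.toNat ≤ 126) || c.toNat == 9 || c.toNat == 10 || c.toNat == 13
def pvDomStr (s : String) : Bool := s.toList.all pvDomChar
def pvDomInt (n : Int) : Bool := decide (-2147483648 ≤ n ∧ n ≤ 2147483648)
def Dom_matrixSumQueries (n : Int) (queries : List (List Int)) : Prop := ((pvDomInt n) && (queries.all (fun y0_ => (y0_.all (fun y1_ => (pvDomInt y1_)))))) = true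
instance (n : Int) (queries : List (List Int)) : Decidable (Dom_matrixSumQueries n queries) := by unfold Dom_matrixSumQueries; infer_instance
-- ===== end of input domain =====

-- B replaces A's reverse scan with seen-boolean arrays by a forward pass recording the last
-- write position per row/column, then a descending pass over the surviving writes
-- (alternative decomposition, not claimed faster).

-- ===== PORT A =====
-- one iteration of A's reverse loop; state = (rowSeenCount, colSeenCount, total, rowSeen, colSeen)
def stepA (n : Int) (queries : List (List Int)) (st : Int × Int × Int × List Bool × List Bool)
    (qi : Int) : Int × Int × Int × List Bool × List Bool :=
  let q := PySem.List.pyGetD queries qi []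
  let typei := PySem.List.pyGetD q 0 0
  let index := PySem.List.pyGetD q 1 0
  let val := PySem.List.pyGetD q 2 0
  let st1 :=
    if typei = 0 ∧ PySem.List.pyGetD st.2.2.2.1 index false = false then
      (st.1 + 1, st.2.1, st.2.2.1 + (n - st.2.1) * val,
       PySem.List.pySetD st.2.2.2.1 index true, st.2.2.2.2)
    else st
  if typei = 1 ∧ PySem.List.pyGetD st1.2.2.2.2 index false = false then
    (st1.1, st1.2.1 + 1, st1.2.2.1 + (n - st1.1) * val,
     st1.2.2.2.1, PySem.List.pySetD st1.2.2.2.2 index true)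
  else st1

def matrixSumQueries (n : Int) (queries : List (List Int)) : Int :=
  ((PySem.List.pyRange (PySem.List.len queries - 1) (-1) (-1)).foldl (stepA n queries)
    (0, 0, 0, List.replicate n.toNat false, List.replicate n.toNat false)).2.2.1

-- ===== PORT B =====
-- one iteration of B's first loop; state = (lastRow, lastCol)
def stepIdx (_n : Int) (queries : List (List Int))
    (st : List (Option Int) × List (Option Int)) (pos : Int) :
    List (Option Int) × List (Option Int) :=
  let q := PySem.List.pyGetD queries pos []
  let t := PySem.List.pyGetD q 0 0
  let idx := PySem.List.pyGetD q 1 0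
  if t = 0 then (PySem.List.pySetD st.1 idx (some pos), st.2)
  else if t = 1 then (st.1, PySem.List.pySetD st.2 idx (some pos))
  else st

-- one iteration of B's second loop; state = (total, rowCnt, colCnt)
def stepB (n : Int) (queries : List (List Int)) (st : Int × Int × Int) (pos : Int) :
    Int × Int × Int :=
  let q := PySem.List.pyGetD queries pos []
  let t := PySem.List.pyGetD q 0 0
  let val := PySem.List.pyGetD q 2 0
  if t = 0 then (st.1 + (n - st.2.2) * val, st.2.1 + 1, st.2.2)
  else (st.1 + (n - st.2.1) * val, st.2.1, st.2.2 + 1)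

def matrixSumQueries_alt (n : Int) (queries : List (List Int)) : Int :=
  let arrs := (PySem.List.pyRange 0 (PySem.List.len queries) 1).foldl (stepIdx n queries)
    (List.replicate n.toNat none, List.replicate n.toNat none)
  ((PySem.List.sorted ((arrs.1 ++ arrs.2).filterMap id) (fun x => x) true).foldl
    (stepB n queries) (0, 0, 0)).1

-- ===== PRECONDITION & SPEC =====
-- Pre_ excludes exactly the inputs where Python A raises: a query with fewer than three entries
-- (IndexError on the unconditional [2] access) or a type-0/1 query whose index is outside [-n, n)
-- (IndexError on the seen array).
def Pre_matrixSumQueries (n : Int) (queries : List (List Int)) : Prop :=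
  ∀ q ∈ queries, 3 ≤ q.length ∧
    ((q.getD 0 0 = 0 ∨ q.getD 0 0 = 1) → -n ≤ q.getD 1 0 ∧ q.getD 1 0 < n)
instance (n : Int) (queries : List (List Int)) : Decidable (Pre_matrixSumQueries n queries) := by
  unfold Pre_matrixSumQueries; infer_instance

def pvWitness_matrixSumQueries : Int × List (List Int) :=
  (3, [[0, 1, 4], [1, -2, 2], [0, 1, 7], [2, 9, 9], [1, 0, -3]])

def Spec_matrixSumQueries (n : Int) (queries : List (List Int)) (out : Int) : Prop := out = matrixSumQueries_alt n queries
instance (n : Int) (queries : List (List Int)) (out : Int) : Decidable (Spec_matrixSumQueries n queries out) := by unfold Spec_matrixSumQueries; infer_instance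

-- ===== CLAIM (what is proved, stated in full; the proofs are below) =====
def Claim_equal_matrixSumQueries : Prop := ∀ (n : Int) (queries : List (List Int)), Dom_matrixSumQueries n queries → Pre_matrixSumQueries n queries → Spec_matrixSumQueries n queries (matrixSumQueries n queries)

-- ===== LEMMAS AND PROOFS =====

-- the (type, normalized index) key of the query at position p, and whether it writes at all
def pvKey (n : Int) (queries : List (List Int)) (p : Int) : Int × Int :=
  (PySem.List.pyGetD (PySem.List.pyGetD queries p []) 0 0,
   PySem.Int.mod (PySem.List.pyGetD (PySem.List.pyGetD queries p []) 1 0) n)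

def pvValidB (queries : List (List Int)) (p : Int) : Bool :=
  PySem.List.pyGetD (PySem.List.pyGetD queries p []) 0 0 == 0 ||
  PySem.List.pyGetD (PySem.List.pyGetD queries p []) 0 0 == 1

-- position of the last valid write with key k among positions < j (reference recursion)
def lastOcc? (n : Int) (queries : List (List Int)) : Nat → (Int × Int) → Option Int
  | 0, _ => none
  | j + 1, k =>
      if pvValidB queries (j : Int) && (pvKey n queries (j : Int) == k) then some (j : Int)
      else lastOcc? n queries j k

-- has this key already been seen, according to A's boolean arrays?
def seenB (rs cs : List Bool) (k : Int × Int) : Bool :=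
  if k.1 = 0 then PySem.List.pyGetD rs k.2 false else PySem.List.pyGetD cs k.2 false

-- does position p act in A's scan of positions < j started with seen arrays rs, cs?
def actsB (n : Int) (queries : List (List Int)) (rs cs : List Bool) (j : Nat) (p : Int) : Bool :=
  (lastOcc? n queries j (pvKey n queries p) == some p) && !(seenB rs cs (pvKey n queries p))

-- B's last-write arrays after the first j positions
def arrsUpTo (n : Int) (queries : List (List Int)) (j : Nat) :
    List (Option Int) × List (Option Int) :=
  (PySem.List.pyRange 0 (j : Int) 1).foldl (stepIdx n queries)
    (List.replicate n.toNat none, List.replicate n.toNat none)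

-- the surviving positions below j, in descending order
def dsurv (n : Int) (queries : List (List Int)) (j : Nat) : List Int :=
  ((PySem.List.pyRange 0 (j : Int) 1).reverse).filter
    (fun p => lastOcc? n queries j (pvKey n queries p) == some p)

theorem pvGetD_nonneg {α : Type} (xs : List α) (i : Int) (d : α) (h : 0 ≤ i) :
    PySem.List.pyGetD xs i d = xs.getD i.toNat d := by
  calc PySem.List.pyGetD xs i d
      = PySem.List.pyGetD xs ((i.toNat : Nat) : Int) d := by rw [Int.toNat_of_nonneg h]
    _ = xs.getD i.toNat d := PySem.List.pyGetD_natCast xs i.toNat d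

theorem pvGetD_replicate (k : Nat) (i : Int) :
    PySem.List.pyGetD (List.replicate k false) i false = false := by
  have hrfl : PySem.List.pyGetD (List.replicate k false) i false
      = (PySem.List.pyGet? (List.replicate k false) i).getD false := rfl
  rw [hrfl]
  cases h : PySem.List.pyGet? (List.replicate k false) i with
  | none => rfl
  | some b =>
      have hb := PySem.List.mem_of_pyGet?_eq_some _ h
      rw [List.eq_of_mem_replicate hb]
      rfl

theorem pvGetD_set {α : Type} (xs : List α) (a b : Nat) (v d : α) (ha : a < xs.length) :
    (xs.set a v).getD b d = if b = a then v else xs.getD b d := by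
  rw [List.getD_eq_getElem?_getD, List.getD_eq_getElem?_getD, List.getElem?_set]
  by_cases h : b = a
  · subst h; simp [ha]
  · rw [if_neg h, if_neg (by simpa using Ne.symm h)]

theorem pvMod_val (n i : Int) (h0 : -n ≤ i) (h1 : i < n) :
    PySem.Int.mod i n = if 0 ≤ i then i else i + n := by
  have hn : 0 < n := by omega
  rw [PySem.Int.mod_eq_emod_of_pos hn]
  by_cases h : 0 ≤ i
  · rw [if_pos h, Int.emod_eq_of_lt h h1]
  · rw [if_neg h]
    have h2 : (i + n) % n = i % n := by
      rw [show i + n = i + n * 1 by ring, Int.add_mul_emod_self_left]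
    rw [← h2, Int.emod_eq_of_lt (by omega) (by omega)]

theorem pvGet_norm {α : Type} (xs : List α) (n i : Int) (d : α) (h0 : -n ≤ i) (h1 : i < n)
    (hl : xs.length = n.toNat) :
    PySem.List.pyGetD xs i d = xs.getD (PySem.Int.mod i n).toNat d := by
  have hn : 0 < n := by omega
  rw [pvMod_val n i h0 h1]
  by_cases h : 0 ≤ i
  · rw [if_pos h, pvGetD_nonneg xs i d h]
  · rw [if_neg h]
    have hlen : -(xs.length : Int) ≤ i := by omega
    have hrfl : PySem.List.pyGetD xs i d = (PySem.List.pyGet? xs i).getD d := rfl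
    rw [hrfl]
    simp only [PySem.List.pyGet?, PySem.List.pyIdx?]
    rw [if_neg h, if_pos hlen]
    have hix : xs.length - (-i).toNat = (i + n).toNat := by omega
    rw [hix, List.getD_eq_getElem?_getD]
    rfl

theorem pvSet_norm {α : Type} (xs : List α) (n i : Int) (v : α) (h0 : -n ≤ i) (h1 : i < n)
    (hl : xs.length = n.toNat) :
    PySem.List.pySetD xs i v = xs.set (PySem.Int.mod i n).toNat v := by
  have hn : 0 < n := by omega
  rw [pvMod_val n i h0 h1]
  by_cases h : 0 ≤ i
  · rw [if_pos h, PySem.List.pySetD_of_nonneg xs v h]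
  · rw [if_neg h]
    have hlen : -(xs.length : Int) ≤ i := by omega
    simp only [PySem.List.pySetD, PySem.List.pySet?, PySem.List.pyIdx?]
    rw [if_neg h, if_pos hlen]
    simp only [Option.map_some, Option.getD_some]
    congr 1
    omega

theorem pvLastOcc_sound (n : Int) (queries : List (List Int)) (j : Nat) (k : Int × Int) (p : Int)
    (h : lastOcc? n queries j k = some p) :
    pvValidB queries p = true ∧ pvKey n queries p = k ∧ 0 ≤ p ∧ p < (j : Int) := by
  induction j with
  | zero => simp [lastOcc?] at h
  | succ j ih =>
      rw [lastOcc?] at h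
      by_cases hc : (pvValidB queries (j : Int) && (pvKey n queries (j : Int) == k)) = true
      · rw [if_pos hc] at h
        obtain ⟨h1, h2⟩ := Bool.and_eq_true_iff.mp hc
        cases h
        refine ⟨h1, by simpa using h2, by omega, by omega⟩
      · rw [if_neg hc] at h
        obtain ⟨h1, h2, h3, h4⟩ := ih h
        refine ⟨h1, h2, h3, by omega⟩

theorem pvPre_at (n : Int) (queries : List (List Int)) (hpre : Pre_matrixSumQueries n queries)
    (p : Int) (h0 : 0 ≤ p) (h1 : p < (queries.length : Int))
    (hv : PySem.List.pyGetD (PySem.List.pyGetD queries p []) 0 0 = 0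
        ∨ PySem.List.pyGetD (PySem.List.pyGetD queries p []) 0 0 = 1) :
    -n ≤ PySem.List.pyGetD (PySem.List.pyGetD queries p []) 1 0
      ∧ PySem.List.pyGetD (PySem.List.pyGetD queries p []) 1 0 < n := by
  have hin : PySem.Raise.InRange queries.length p := by
    simp [PySem.Raise.InRange]; omega
  have hqmem := PySem.List.pyGetD_mem queries ([] : List Int) hin
  have e0 := PySem.List.pyGetD_ofNat' (PySem.List.pyGetD queries p []) 0 (0 : Int)
  have e1 := PySem.List.pyGetD_ofNat' (PySem.List.pyGetD queries p []) 1 (0 : Int)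
  obtain ⟨-, hb⟩ := hpre _ hqmem
  rw [e0] at hv
  rw [e1]
  exact hb hv

theorem pvValid_iff (queries : List (List Int)) (p : Int) :
    pvValidB queries p = true ↔
      (PySem.List.pyGetD (PySem.List.pyGetD queries p []) 0 0 = 0
        ∨ PySem.List.pyGetD (PySem.List.pyGetD queries p []) 0 0 = 1) := by
  simp only [pvValidB, Bool.or_eq_true, beq_iff_eq]

theorem pvKey_bounds (n : Int) (queries : List (List Int)) (hpre : Pre_matrixSumQueries n queries)
    (p : Int) (h0 : 0 ≤ p) (h1 : p < (queries.length : Int)) (hv : pvValidB queries p = true) :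
    0 ≤ (pvKey n queries p).2 ∧ (pvKey n queries p).2 < n := by
  obtain ⟨hb0, hb1⟩ := pvPre_at n queries hpre p h0 h1 ((pvValid_iff queries p).mp hv)
  have hn : 0 < n := by omega
  exact ⟨PySem.Int.mod_nonneg _ hn, PySem.Int.mod_lt _ hn⟩

-- characterization of B's last-write arrays: lengths stay n, entries are lastOcc?
theorem pvArrs_char (n : Int) (queries : List (List Int))
    (hpre : Pre_matrixSumQueries n queries) (j : Nat) (hj : j ≤ queries.length) :
    ((arrsUpTo n queries j).1.length = n.toNat ∧ (arrsUpTo n queries j).2.length = n.toNat) ∧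
    ∀ k : Nat, k < n.toNat →
      (arrsUpTo n queries j).1.getD k none = lastOcc? n queries j (0, (k : Int)) ∧
      (arrsUpTo n queries j).2.getD k none = lastOcc? n queries j (1, (k : Int)) := by
  induction j with
  | zero =>
      refine ⟨⟨by simp [arrsUpTo, PySem.List.pyRange_one_eq_nil (by omega : (0:Int) ≤ 0)],
               by simp [arrsUpTo, PySem.List.pyRange_one_eq_nil (by omega : (0:Int) ≤ 0)]⟩, ?_⟩
      intro k hk
      constructor <;>
        simp [arrsUpTo, lastOcc?, PySem.List.pyRange_one_eq_nil (by omega : (0:Int) ≤ 0),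
          List.getD_eq_getElem?_getD, hk]
  | succ j ih =>
      obtain ⟨⟨hl1, hl2⟩, hent⟩ := ih (by omega)
      have hstep : arrsUpTo n queries (j + 1) = stepIdx n queries (arrsUpTo n queries j) (j : Int) := by
        rw [arrsUpTo, arrsUpTo, show ((j + 1 : Nat) : Int) = (j : Int) + 1 by push_cast; ring,
            PySem.List.pyRange_one_succ_right (by omega), List.foldl_append]
        rfl
      have hjlt : (j : Int) < (queries.length : Int) := by omega
      rw [hstep]
      by_cases ht0 : PySem.List.pyGetD (PySem.List.pyGetD queries (j : Int) []) 0 0 = 0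
      · obtain ⟨hb0, hb1⟩ := pvPre_at n queries hpre (j : Int) (by omega) hjlt (Or.inl ht0)
        have hn : 0 < n := by omega
        set m := PySem.Int.mod (PySem.List.pyGetD (PySem.List.pyGetD queries (j : Int) []) 1 0) n with hm
        have hm0 : 0 ≤ m := PySem.Int.mod_nonneg _ hn
        have hm1 : m < n := PySem.Int.mod_lt _ hn
        have hmlen : m.toNat < (arrsUpTo n queries j).1.length := by omega
        have hset : PySem.List.pySetD (arrsUpTo n queries j).1
            (PySem.List.pyGetD (PySem.List.pyGetD queries (j : Int) []) 1 0) (some (j : Int))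
            = (arrsUpTo n queries j).1.set m.toNat (some (j : Int)) :=
          pvSet_norm _ n _ _ hb0 hb1 hl1
        have hsi : stepIdx n queries (arrsUpTo n queries j) (j : Int)
            = ((arrsUpTo n queries j).1.set m.toNat (some (j : Int)), (arrsUpTo n queries j).2) := by
          simp only [stepIdx]
          rw [if_pos ht0, hset]
        rw [hsi]
        refine ⟨⟨by rw [List.length_set]; exact hl1, hl2⟩, ?_⟩
        intro k hk
        have hkey : pvKey n queries (j : Int)
            = (0, m) := by rw [pvKey, ht0, hm]
        constructor
        · rw [pvGetD_set _ _ _ _ _ hmlen]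
          rw [lastOcc?]
          by_cases he : k = m.toNat
          · rw [if_pos he, if_pos (by
              rw [Bool.and_eq_true, beq_iff_eq]
              refine ⟨(pvValid_iff queries (j : Int)).mpr (Or.inl ht0), ?_⟩
              rw [hkey]
              congr 1
              omega)]
          · rw [if_neg he, if_neg (by
              rw [Bool.and_eq_true, beq_iff_eq, hkey]
              rintro ⟨-, hq⟩
              have : m = (k : Int) := (Prod.ext_iff.mp hq).2
              omega), (hent k hk).1]
        · rw [lastOcc?, if_neg (by
            rw [Bool.and_eq_true, beq_iff_eq, hkey]
            rintro ⟨-, hq⟩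
            exact absurd (Prod.ext_iff.mp hq).1 (by norm_num)), (hent k hk).2]
      · by_cases ht1 : PySem.List.pyGetD (PySem.List.pyGetD queries (j : Int) []) 0 0 = 1
        · obtain ⟨hb0, hb1⟩ := pvPre_at n queries hpre (j : Int) (by omega) hjlt (Or.inr ht1)
          have hn : 0 < n := by omega
          set m := PySem.Int.mod (PySem.List.pyGetD (PySem.List.pyGetD queries (j : Int) []) 1 0) n with hm
          have hm0 : 0 ≤ m := PySem.Int.mod_nonneg _ hn
          have hm1 : m < n := PySem.Int.mod_lt _ hn
          have hmlen : m.toNat < (arrsUpTo n queries j).2.length := by omega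
          have hset : PySem.List.pySetD (arrsUpTo n queries j).2
              (PySem.List.pyGetD (PySem.List.pyGetD queries (j : Int) []) 1 0) (some (j : Int))
              = (arrsUpTo n queries j).2.set m.toNat (some (j : Int)) :=
            pvSet_norm _ n _ _ hb0 hb1 hl2
          have hsi : stepIdx n queries (arrsUpTo n queries j) (j : Int)
              = ((arrsUpTo n queries j).1, (arrsUpTo n queries j).2.set m.toNat (some (j : Int))) := by
            simp only [stepIdx]
            rw [if_neg ht0, if_pos ht1, hset]
          rw [hsi]
          refine ⟨⟨hl1, by rw [List.length_set]; exact hl2⟩, ?_⟩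
          intro k hk
          have hkey : pvKey n queries (j : Int) = (1, m) := by rw [pvKey, ht1, hm]
          constructor
          · rw [lastOcc?, if_neg (by
              rw [Bool.and_eq_true, beq_iff_eq, hkey]
              rintro ⟨-, hq⟩
              exact absurd (Prod.ext_iff.mp hq).1 (by norm_num)), (hent k hk).1]
          · rw [pvGetD_set _ _ _ _ _ hmlen]
            rw [lastOcc?]
            by_cases he : k = m.toNat
            · rw [if_pos he, if_pos (by
                rw [Bool.and_eq_true, beq_iff_eq]
                refine ⟨(pvValid_iff queries (j : Int)).mpr (Or.inr ht1), ?_⟩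
                rw [hkey]
                congr 1
                omega)]
            · rw [if_neg he, if_neg (by
                rw [Bool.and_eq_true, beq_iff_eq, hkey]
                rintro ⟨-, hq⟩
                have : m = (k : Int) := (Prod.ext_iff.mp hq).2
                omega), (hent k hk).2]
        · have hvb : pvValidB queries (j : Int) = false := by
            cases h : pvValidB queries (j : Int)
            · rfl
            · exact absurd ((pvValid_iff queries (j : Int)).mp h) (by tauto)
          have hsi : stepIdx n queries (arrsUpTo n queries j) (j : Int)
              = arrsUpTo n queries j := by
            simp only [stepIdx]
            rw [if_neg ht0, if_neg ht1]
          rw [hsi]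
          refine ⟨⟨hl1, hl2⟩, ?_⟩
          intro k hk
          have hskip : ∀ kk : Int × Int, lastOcc? n queries (j + 1) kk = lastOcc? n queries j kk := by
            intro kk
            rw [lastOcc?, if_neg (by rw [Bool.and_eq_true]; rintro ⟨h, -⟩; rw [hvb] at h; cases h)]
          rw [hskip, hskip]
          exact hent k hk

-- a list of options whose some-entries determine their own slot has no duplicate values
theorem pvNodup_filterMap_id {α : Type} (l : List (Option α)) (f : α → Nat)
    (h : ∀ (k : Nat) (a : α), l[k]? = some (some a) → f a = k) :
    (l.filterMap id).Nodup := by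
  induction l generalizing f with
  | nil => simp
  | cons o rest ih =>
      have hrest : (rest.filterMap id).Nodup := by
        refine ih (fun a => f a - 1) ?_
        intro k a hk
        have := h (k + 1) a (by simpa using hk)
        show f a - 1 = k
        omega
      cases o with
      | none => simpa using hrest
      | some a =>
          refine List.nodup_cons.mpr ⟨?_, hrest⟩
          intro hmem
          obtain ⟨o', ho', he⟩ := List.mem_filterMap.mp hmem
          have : o' = some a := by cases o' <;> simp_all [id]
          subst this
          obtain ⟨k, hk, hget⟩ := List.mem_iff_getElem.mp ho'
          have h1 := h 0 a (by simp)
          have h2 := h (k + 1) a (by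
            simp only [List.getElem?_cons_succ]
            rw [List.getElem?_eq_getElem hk, hget])
          omega

-- membership in B's surviving positions
theorem pvSurv_mem (n : Int) (queries : List (List Int))
    (hpre : Pre_matrixSumQueries n queries) (p : Int) :
    p ∈ ((arrsUpTo n queries queries.length).1 ++ (arrsUpTo n queries queries.length).2).filterMap id
      ↔ lastOcc? n queries queries.length (pvKey n queries p) = some p := by
  obtain ⟨⟨hl1, hl2⟩, hent⟩ := pvArrs_char n queries hpre queries.length (le_refl _)
  constructor
  · intro hmem
    obtain ⟨o', ho', he⟩ := List.mem_filterMap.mp hmem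
    have ho'' : o' = some p := by cases o' <;> simp_all [id]
    subst ho''
    rcases List.mem_append.mp ho' with hmem1 | hmem1
    · obtain ⟨k, hk, hget⟩ := List.mem_iff_getElem.mp hmem1
      have hgd : (arrsUpTo n queries queries.length).1.getD k none = some p := by
        rw [List.getD_eq_getElem?_getD, List.getElem?_eq_getElem hk]
        simpa using hget
      have hlo : lastOcc? n queries queries.length (0, (k : Int)) = some p := by
        rw [← (hent k (by omega)).1]; exact hgd
      obtain ⟨-, hkey, -, -⟩ := pvLastOcc_sound n queries _ _ _ hlo
      rw [hkey]; exact hlo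
    · obtain ⟨k, hk, hget⟩ := List.mem_iff_getElem.mp hmem1
      have hgd : (arrsUpTo n queries queries.length).2.getD k none = some p := by
        rw [List.getD_eq_getElem?_getD, List.getElem?_eq_getElem hk]
        simpa using hget
      have hlo : lastOcc? n queries queries.length (1, (k : Int)) = some p := by
        rw [← (hent k (by omega)).2]; exact hgd
      obtain ⟨-, hkey, -, -⟩ := pvLastOcc_sound n queries _ _ _ hlo
      rw [hkey]; exact hlo
  · intro h
    obtain ⟨hvp, hkey, hp0, hp1⟩ := pvLastOcc_sound n queries _ _ _ h
    obtain ⟨hk0, hk1⟩ := pvKey_bounds n queries hpre p hp0 hp1 hvp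
    have hknat : ((pvKey n queries p).2.toNat : Int) = (pvKey n queries p).2 :=
      Int.toNat_of_nonneg hk0
    have hklt : (pvKey n queries p).2.toNat < n.toNat := by omega
    rcases (pvValid_iff queries p).mp hvp with ht0 | ht1
    · have hkeq : pvKey n queries p = (0, ((pvKey n queries p).2.toNat : Int)) := by
        rw [Prod.ext_iff]
        exact ⟨ht0, hknat.symm⟩
      have hgd : (arrsUpTo n queries queries.length).1.getD (pvKey n queries p).2.toNat none
          = some p := by
        rw [(hent _ hklt).1, ← hkeq]; exact h
      refine List.mem_filterMap.mpr ⟨some p, ?_, rfl⟩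
      refine List.mem_append.mpr (Or.inl ?_)
      have hlen : (pvKey n queries p).2.toNat < (arrsUpTo n queries queries.length).1.length := by
        omega
      rw [List.getD_eq_getElem?_getD, List.getElem?_eq_getElem hlen, Option.getD_some] at hgd
      exact hgd ▸ List.getElem_mem hlen
    · have hkeq : pvKey n queries p = (1, ((pvKey n queries p).2.toNat : Int)) := by
        rw [Prod.ext_iff]
        exact ⟨ht1, hknat.symm⟩
      have hgd : (arrsUpTo n queries queries.length).2.getD (pvKey n queries p).2.toNat none
          = some p := by
        rw [(hent _ hklt).2, ← hkeq]; exact h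
      refine List.mem_filterMap.mpr ⟨some p, ?_, rfl⟩
      refine List.mem_append.mpr (Or.inr ?_)
      have hlen : (pvKey n queries p).2.toNat < (arrsUpTo n queries queries.length).2.length := by
        omega
      rw [List.getD_eq_getElem?_getD, List.getElem?_eq_getElem hlen, Option.getD_some] at hgd
      exact hgd ▸ List.getElem_mem hlen

theorem pvSurv_nodup (n : Int) (queries : List (List Int))
    (hpre : Pre_matrixSumQueries n queries) :
    (((arrsUpTo n queries queries.length).1 ++ (arrsUpTo n queries queries.length).2).filterMap id).Nodup := by
  obtain ⟨⟨hl1, hl2⟩, hent⟩ := pvArrs_char n queries hpre queries.length (le_refl _)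
  refine pvNodup_filterMap_id _
    (fun p => if (pvKey n queries p).1 = 0 then (pvKey n queries p).2.toNat
              else n.toNat + (pvKey n queries p).2.toNat) ?_
  intro k p hk
  by_cases hlt : k < n.toNat
  · have hget : (arrsUpTo n queries queries.length).1[k]? = some (some p) := by
      rw [List.getElem?_append_left (by omega)] at hk
      exact hk
    have hgd : (arrsUpTo n queries queries.length).1.getD k none = some p := by
      rw [List.getD_eq_getElem?_getD, hget]; rfl
    have hlo : lastOcc? n queries queries.length (0, (k : Int)) = some p := by
      rw [← (hent k hlt).1]; exact hgd
    obtain ⟨-, hkey, -, -⟩ := pvLastOcc_sound n queries _ _ _ hlo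
    simp [hkey]
  · have hklen : k < (arrsUpTo n queries queries.length).1.length
        + (arrsUpTo n queries queries.length).2.length := by
      have := List.getElem?_eq_some_iff.mp hk
      simpa [List.length_append] using this.1
    have hget : (arrsUpTo n queries queries.length).2[k - n.toNat]? = some (some p) := by
      rw [List.getElem?_append_right (by omega)] at hk
      rw [← hk]
      congr 1
      omega
    have hk2 : k - n.toNat < n.toNat := by omega
    have hgd : (arrsUpTo n queries queries.length).2.getD (k - n.toNat) none = some p := by
      rw [List.getD_eq_getElem?_getD, hget]; rfl
    have hlo : lastOcc? n queries queries.length (1, ((k - n.toNat : Nat) : Int)) = some p := by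
      rw [← (hent _ hk2).2]; exact hgd
    obtain ⟨-, hkey, -, -⟩ := pvLastOcc_sound n queries _ _ _ hlo
    simp [hkey]
    omega

theorem pvDsurv_mem (n : Int) (queries : List (List Int)) (j : Nat) (p : Int) :
    p ∈ dsurv n queries j ↔ lastOcc? n queries j (pvKey n queries p) = some p := by
  unfold dsurv
  rw [List.mem_filter]
  simp only [List.mem_reverse, PySem.List.mem_pyRange_one, beq_iff_eq]
  constructor
  · rintro ⟨_, h⟩; exact h
  · intro h
    obtain ⟨_, _, h3, h4⟩ := pvLastOcc_sound n queries j _ p h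
    exact ⟨⟨h3, h4⟩, h⟩

theorem pvDsurv_pairwise (n : Int) (queries : List (List Int)) (j : Nat) :
    (dsurv n queries j).Pairwise (fun a b => b < a) := by
  unfold dsurv
  apply List.Pairwise.filter
  rw [List.pairwise_reverse]
  exact PySem.List.pairwise_lt_pyRange_one 0 (j : Int)

theorem pvSorted_surv (n : Int) (queries : List (List Int))
    (hpre : Pre_matrixSumQueries n queries) :
    PySem.List.sorted
      (((arrsUpTo n queries queries.length).1 ++ (arrsUpTo n queries queries.length).2).filterMap id)
      (fun x => x) true = dsurv n queries queries.length := by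
  apply PySem.List.sorted_rev_eq_of_perm_of_pairwise_gt
  · rw [List.perm_ext_iff_of_nodup
      ((pvDsurv_pairwise n queries queries.length).imp ne_of_gt) (pvSurv_nodup n queries hpre)]
    intro a
    rw [pvDsurv_mem, pvSurv_mem n queries hpre]
  · exact pvDsurv_pairwise n queries queries.length

theorem pvTail_congr (n : Int) (queries : List (List Int)) (hpre : Pre_matrixSumQueries n queries)
    (j : Nat) (hj : (j : Int) < (queries.length : Int))
    (hv : pvValidB queries (j : Int) = true)
    (rs cs rs' cs' : List Bool)
    (hother : ∀ k : Int × Int, k ≠ pvKey n queries (j : Int) → (k.1 = 0 ∨ k.1 = 1) →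
        0 ≤ k.2 → k.2 < n → seenB rs' cs' k = seenB rs cs k)
    (hkj : seenB rs' cs' (pvKey n queries (j : Int)) = true) :
    ∀ p ∈ (PySem.List.pyRange 0 (j : Int) 1).reverse,
      actsB n queries rs cs (j + 1) p = actsB n queries rs' cs' j p := by
  intro p hp
  have hp' : 0 ≤ p ∧ p < (j : Int) := by
    simpa [List.mem_reverse, PySem.List.mem_pyRange_one] using hp
  unfold actsB
  by_cases hkp : pvKey n queries p = pvKey n queries (j : Int)
  · have hlo : lastOcc? n queries (j + 1) (pvKey n queries p) = some (j : Int) := by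
      simp only [lastOcc?]
      rw [if_pos (by rw [Bool.and_eq_true, beq_iff_eq]; exact ⟨hv, hkp.symm⟩)]
    rw [hlo]
    have hL : ((some (j : Int) : Option Int) == some p) = false := by
      simp only [beq_eq_false_iff_ne, ne_eq, Option.some.injEq]
      omega
    rw [hL, Bool.false_and, hkp, hkj]
    simp
  · have hlo : lastOcc? n queries (j + 1) (pvKey n queries p)
        = lastOcc? n queries j (pvKey n queries p) := by
      simp only [lastOcc?]
      rw [if_neg (by
        rw [Bool.and_eq_true, beq_iff_eq]
        rintro ⟨-, h⟩
        exact hkp h.symm)]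
    rw [hlo]
    by_cases hlop : lastOcc? n queries j (pvKey n queries p) = some p
    · obtain ⟨hvp, -, hp0, -⟩ := pvLastOcc_sound n queries j _ p hlop
      have hb := pvKey_bounds n queries hpre p hp0 (by omega) hvp
      have hfst : (pvKey n queries p).1 = 0 ∨ (pvKey n queries p).1 = 1 :=
        (pvValid_iff queries p).mp hvp
      rw [hother _ hkp hfst hb.1 hb.2]
    · have hfalse : (lastOcc? n queries j (pvKey n queries p) == some p) = false := by
        simpa using hlop
      rw [hfalse, Bool.false_and, Bool.false_and]

theorem pvTail_congr_invalid (n : Int) (queries : List (List Int)) (j : Nat)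
    (hv : pvValidB queries (j : Int) = false) (rs cs : List Bool) :
    ∀ p ∈ (PySem.List.pyRange 0 (j : Int) 1).reverse,
      actsB n queries rs cs (j + 1) p = actsB n queries rs cs j p := by
  intro p hp
  unfold actsB
  have hlo : lastOcc? n queries (j + 1) (pvKey n queries p)
      = lastOcc? n queries j (pvKey n queries p) := by
    simp only [lastOcc?]
    rw [if_neg (by rw [Bool.and_eq_true]; rintro ⟨h, -⟩; rw [hv] at h; cases h)]
  rw [hlo]

theorem pvHead_stale (n : Int) (queries : List (List Int)) (j : Nat) (rs cs : List Bool)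
    (h : lastOcc? n queries (j + 1) (pvKey n queries (j : Int)) ≠ some (j : Int)) :
    actsB n queries rs cs (j + 1) (j : Int) = false := by
  unfold actsB
  have hb : (lastOcc? n queries (j + 1) (pvKey n queries (j : Int)) == some (j : Int)) = false := by
    simpa using h
  rw [hb, Bool.false_and]

theorem pvMain (n : Int) (queries : List (List Int)) (hpre : Pre_matrixSumQueries n queries)
    (j : Nat) (hj : j ≤ queries.length) :
    ∀ (rs cs : List Bool) (rc cc tot : Int),
      rs.length = n.toNat → cs.length = n.toNat →
      (((PySem.List.pyRange 0 (j : Int) 1).reverse).foldl (stepA n queries)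
          (rc, cc, tot, rs, cs)).2.2.1
        = ((((PySem.List.pyRange 0 (j : Int) 1).reverse).filter
              (fun p => actsB n queries rs cs j p)).foldl (stepB n queries) (tot, rc, cc)).1 := by
  revert hj
  induction j with
  | zero =>
      intro hj rs cs rc cc tot hrs hcs
      rw [PySem.List.pyRange_one_eq_nil (by omega)]
      rfl
  | succ j ih =>
      intro hj rs cs rc cc tot hrs hcs
      have hjlt : (j : Int) < (queries.length : Int) := by omega
      have hsplit : (PySem.List.pyRange 0 ((j + 1 : Nat) : Int) 1).reverse
          = (j : Int) :: (PySem.List.pyRange 0 (j : Int) 1).reverse := by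
        rw [show ((j + 1 : Nat) : Int) = (j : Int) + 1 by push_cast; ring,
            PySem.List.pyRange_one_succ_right (by omega)]
        simp
      rw [hsplit]
      by_cases ht0 : PySem.List.pyGetD (PySem.List.pyGetD queries (j : Int) []) 0 0 = 0
      · -- type-0 query
        have hvb : pvValidB queries (j : Int) = true := (pvValid_iff queries (j : Int)).mpr (Or.inl ht0)
        obtain ⟨hb0, hb1⟩ := pvPre_at n queries hpre (j : Int) (by omega) hjlt (Or.inl ht0)
        have hn : 0 < n := by omega
        have hjx0 : 0 ≤ PySem.Int.mod (PySem.List.pyGetD (PySem.List.pyGetD queries (j : Int) []) 1 0) n :=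
          PySem.Int.mod_nonneg _ hn
        have hjx1 : PySem.Int.mod (PySem.List.pyGetD (PySem.List.pyGetD queries (j : Int) []) 1 0) n < n :=
          PySem.Int.mod_lt _ hn
        have hjxlen : (PySem.Int.mod (PySem.List.pyGetD (PySem.List.pyGetD queries (j : Int) []) 1 0) n).toNat < rs.length := by omega
        have hget : PySem.List.pyGetD rs (PySem.List.pyGetD (PySem.List.pyGetD queries (j : Int) []) 1 0) false
            = rs.getD (PySem.Int.mod (PySem.List.pyGetD (PySem.List.pyGetD queries (j : Int) []) 1 0) n).toNat false :=
          pvGet_norm rs n _ false hb0 hb1 hrs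
        have hkseen_eq : seenB rs cs (pvKey n queries (j : Int))
            = rs.getD (PySem.Int.mod (PySem.List.pyGetD (PySem.List.pyGetD queries (j : Int) []) 1 0) n).toNat false := by
          unfold seenB pvKey
          rw [if_pos ht0, pvGetD_nonneg rs _ false hjx0]
        by_cases hseen : rs.getD (PySem.Int.mod (PySem.List.pyGetD (PySem.List.pyGetD queries (j : Int) []) 1 0) n).toNat false = true
        · -- already seen: A skips, B's filter drops j
          have hstep : stepA n queries (rc, cc, tot, rs, cs) (j : Int) = (rc, cc, tot, rs, cs) := by
            simp only [stepA]
            rw [if_neg (by rintro ⟨h1, -⟩; exact absurd (ht0.symm.trans h1) (by norm_num))]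
            rw [if_neg (by rintro ⟨-, h2⟩; rw [hget, hseen] at h2; cases h2)]
          have hhead : actsB n queries rs cs (j + 1) (j : Int) = false := by
            unfold actsB
            rw [hkseen_eq, hseen]
            simp
          rw [List.foldl_cons, hstep, List.filter_cons_of_neg (by rw [hhead]; simp)]
          rw [List.filter_congr (pvTail_congr n queries hpre j hjlt hvb rs cs rs cs
            (fun k _ _ _ _ => rfl) (by rw [hkseen_eq]; exact hseen))]
          exact ih (by omega) rs cs rc cc tot hrs hcs
        · -- not seen: both act
          have hseenF : rs.getD (PySem.Int.mod (PySem.List.pyGetD (PySem.List.pyGetD queries (j : Int) []) 1 0) n).toNat false = false := by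
            cases hx : rs.getD (PySem.Int.mod (PySem.List.pyGetD (PySem.List.pyGetD queries (j : Int) []) 1 0) n).toNat false
            · rfl
            · exact absurd hx hseen
          have hsetnorm : PySem.List.pySetD rs (PySem.List.pyGetD (PySem.List.pyGetD queries (j : Int) []) 1 0) true
              = rs.set (PySem.Int.mod (PySem.List.pyGetD (PySem.List.pyGetD queries (j : Int) []) 1 0) n).toNat true :=
            pvSet_norm rs n _ true hb0 hb1 hrs
          have hstep : stepA n queries (rc, cc, tot, rs, cs) (j : Int)
              = (rc + 1, cc, tot + (n - cc) * PySem.List.pyGetD (PySem.List.pyGetD queries (j : Int) []) 2 0,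
                 rs.set (PySem.Int.mod (PySem.List.pyGetD (PySem.List.pyGetD queries (j : Int) []) 1 0) n).toNat true, cs) := by
            simp only [stepA]
            rw [if_neg (by rintro ⟨h1, -⟩; exact absurd (ht0.symm.trans h1) (by norm_num))]
            rw [if_pos ⟨ht0, by rw [hget]; exact hseenF⟩]
            rw [hsetnorm]
          have hhead : actsB n queries rs cs (j + 1) (j : Int) = true := by
            unfold actsB
            have hlo : lastOcc? n queries (j + 1) (pvKey n queries (j : Int)) = some (j : Int) := by
              simp only [lastOcc?]
              rw [if_pos (by rw [Bool.and_eq_true, beq_iff_eq]; exact ⟨hvb, rfl⟩)]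
            rw [hlo, hkseen_eq, hseenF]
            simp
          have hstepB : stepB n queries (tot, rc, cc) (j : Int)
              = (tot + (n - cc) * PySem.List.pyGetD (PySem.List.pyGetD queries (j : Int) []) 2 0, rc + 1, cc) := by
            simp only [stepB]
            rw [if_pos ht0]
          have hother : ∀ k : Int × Int, k ≠ pvKey n queries (j : Int) → (k.1 = 0 ∨ k.1 = 1) →
              0 ≤ k.2 → k.2 < n →
              seenB (rs.set (PySem.Int.mod (PySem.List.pyGetD (PySem.List.pyGetD queries (j : Int) []) 1 0) n).toNat true) cs k
                = seenB rs cs k := by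
            intro k hk hfst h0 h1
            unfold seenB
            rcases hfst with hf0 | hf1
            · rw [if_pos hf0, if_pos hf0, pvGetD_nonneg _ _ _ h0, pvGetD_nonneg _ _ _ h0,
                pvGetD_set _ _ _ _ _ hjxlen]
              rw [if_neg (by
                intro he
                apply hk
                have h2 : k.2 = PySem.Int.mod (PySem.List.pyGetD (PySem.List.pyGetD queries (j : Int) []) 1 0) n := by omega
                have : pvKey n queries (j : Int)
                    = (PySem.List.pyGetD (PySem.List.pyGetD queries (j : Int) []) 0 0,
                       PySem.Int.mod (PySem.List.pyGetD (PySem.List.pyGetD queries (j : Int) []) 1 0) n) := rfl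
                rw [this, ht0, Prod.ext_iff]
                exact ⟨hf0, h2⟩)]
            · rw [if_neg (by rw [hf1]; norm_num), if_neg (by rw [hf1]; norm_num)]
          have hkj : seenB (rs.set (PySem.Int.mod (PySem.List.pyGetD (PySem.List.pyGetD queries (j : Int) []) 1 0) n).toNat true) cs
              (pvKey n queries (j : Int)) = true := by
            unfold seenB pvKey
            rw [if_pos ht0, pvGetD_nonneg _ _ _ hjx0, pvGetD_set _ _ _ _ _ hjxlen, if_pos rfl]
          rw [List.foldl_cons, hstep, List.filter_cons_of_pos hhead, List.foldl_cons, hstepB]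
          rw [List.filter_congr (pvTail_congr n queries hpre j hjlt hvb rs cs _ cs hother hkj)]
          exact ih (by omega) _ cs (rc + 1) cc _ (by rw [List.length_set]; exact hrs) hcs
      · by_cases ht1 : PySem.List.pyGetD (PySem.List.pyGetD queries (j : Int) []) 0 0 = 1
        · -- type-1 query
          have hvb : pvValidB queries (j : Int) = true := (pvValid_iff queries (j : Int)).mpr (Or.inr ht1)
          obtain ⟨hb0, hb1⟩ := pvPre_at n queries hpre (j : Int) (by omega) hjlt (Or.inr ht1)
          have hn : 0 < n := by omega
          have hjx0 : 0 ≤ PySem.Int.mod (PySem.List.pyGetD (PySem.List.pyGetD queries (j : Int) []) 1 0) n :=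
            PySem.Int.mod_nonneg _ hn
          have hjx1 : PySem.Int.mod (PySem.List.pyGetD (PySem.List.pyGetD queries (j : Int) []) 1 0) n < n :=
            PySem.Int.mod_lt _ hn
          have hjxlen : (PySem.Int.mod (PySem.List.pyGetD (PySem.List.pyGetD queries (j : Int) []) 1 0) n).toNat < cs.length := by omega
          have hget : PySem.List.pyGetD cs (PySem.List.pyGetD (PySem.List.pyGetD queries (j : Int) []) 1 0) false
              = cs.getD (PySem.Int.mod (PySem.List.pyGetD (PySem.List.pyGetD queries (j : Int) []) 1 0) n).toNat false :=
            pvGet_norm cs n _ false hb0 hb1 hcs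
          have hkseen_eq : seenB rs cs (pvKey n queries (j : Int))
              = cs.getD (PySem.Int.mod (PySem.List.pyGetD (PySem.List.pyGetD queries (j : Int) []) 1 0) n).toNat false := by
            unfold seenB pvKey
            rw [if_neg (by rw [ht1]; norm_num), pvGetD_nonneg cs _ false hjx0]
          by_cases hseen : cs.getD (PySem.Int.mod (PySem.List.pyGetD (PySem.List.pyGetD queries (j : Int) []) 1 0) n).toNat false = true
          · have hstep : stepA n queries (rc, cc, tot, rs, cs) (j : Int) = (rc, cc, tot, rs, cs) := by
              simp only [stepA]
              rw [if_neg (show ¬ (PySem.List.pyGetD (PySem.List.pyGetD queries (j : Int) []) 0 0 = 0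
                  ∧ PySem.List.pyGetD ((rc, cc, tot, rs, cs) : Int × Int × Int × List Bool × List Bool).2.2.2.1
                      (PySem.List.pyGetD (PySem.List.pyGetD queries (j : Int) []) 1 0) false = false) from
                by rintro ⟨h1, -⟩; exact ht0 h1)]
              rw [if_neg (by rintro ⟨-, h2⟩; rw [hget, hseen] at h2; cases h2)]
            have hhead : actsB n queries rs cs (j + 1) (j : Int) = false := by
              unfold actsB
              rw [hkseen_eq, hseen]
              simp
            rw [List.foldl_cons, hstep, List.filter_cons_of_neg (by rw [hhead]; simp)]
            rw [List.filter_congr (pvTail_congr n queries hpre j hjlt hvb rs cs rs cs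
              (fun k _ _ _ _ => rfl) (by rw [hkseen_eq]; exact hseen))]
            exact ih (by omega) rs cs rc cc tot hrs hcs
          · have hseenF : cs.getD (PySem.Int.mod (PySem.List.pyGetD (PySem.List.pyGetD queries (j : Int) []) 1 0) n).toNat false = false := by
              cases hx : cs.getD (PySem.Int.mod (PySem.List.pyGetD (PySem.List.pyGetD queries (j : Int) []) 1 0) n).toNat false
              · rfl
              · exact absurd hx hseen
            have hsetnorm : PySem.List.pySetD cs (PySem.List.pyGetD (PySem.List.pyGetD queries (j : Int) []) 1 0) true
                = cs.set (PySem.Int.mod (PySem.List.pyGetD (PySem.List.pyGetD queries (j : Int) []) 1 0) n).toNat true :=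
              pvSet_norm cs n _ true hb0 hb1 hcs
            have hstep : stepA n queries (rc, cc, tot, rs, cs) (j : Int)
                = (rc, cc + 1, tot + (n - rc) * PySem.List.pyGetD (PySem.List.pyGetD queries (j : Int) []) 2 0,
                   rs, cs.set (PySem.Int.mod (PySem.List.pyGetD (PySem.List.pyGetD queries (j : Int) []) 1 0) n).toNat true) := by
              simp only [stepA]
              rw [if_neg (show ¬ (PySem.List.pyGetD (PySem.List.pyGetD queries (j : Int) []) 0 0 = 0
                  ∧ PySem.List.pyGetD ((rc, cc, tot, rs, cs) : Int × Int × Int × List Bool × List Bool).2.2.2.1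
                      (PySem.List.pyGetD (PySem.List.pyGetD queries (j : Int) []) 1 0) false = false) from
                by rintro ⟨h1, -⟩; exact ht0 h1)]
              rw [if_pos ⟨ht1, by rw [hget]; exact hseenF⟩]
              rw [hsetnorm]
            have hhead : actsB n queries rs cs (j + 1) (j : Int) = true := by
              unfold actsB
              have hlo : lastOcc? n queries (j + 1) (pvKey n queries (j : Int)) = some (j : Int) := by
                simp only [lastOcc?]
                rw [if_pos (by rw [Bool.and_eq_true, beq_iff_eq]; exact ⟨hvb, rfl⟩)]
              rw [hlo, hkseen_eq, hseenF]
              simp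
            have hstepB : stepB n queries (tot, rc, cc) (j : Int)
                = (tot + (n - rc) * PySem.List.pyGetD (PySem.List.pyGetD queries (j : Int) []) 2 0, rc, cc + 1) := by
              simp only [stepB]
              rw [if_neg ht0]
            have hother : ∀ k : Int × Int, k ≠ pvKey n queries (j : Int) → (k.1 = 0 ∨ k.1 = 1) →
                0 ≤ k.2 → k.2 < n →
                seenB rs (cs.set (PySem.Int.mod (PySem.List.pyGetD (PySem.List.pyGetD queries (j : Int) []) 1 0) n).toNat true) k
                  = seenB rs cs k := by
              intro k hk hfst h0 h1
              unfold seenB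
              rcases hfst with hf0 | hf1
              · rw [if_pos hf0, if_pos hf0]
              · rw [if_neg (by rw [hf1]; norm_num), if_neg (by rw [hf1]; norm_num),
                  pvGetD_nonneg _ _ _ h0, pvGetD_nonneg _ _ _ h0, pvGetD_set _ _ _ _ _ hjxlen]
                rw [if_neg (by
                  intro he
                  apply hk
                  have h2 : k.2 = PySem.Int.mod (PySem.List.pyGetD (PySem.List.pyGetD queries (j : Int) []) 1 0) n := by omega
                  have hpk : pvKey n queries (j : Int)
                      = (PySem.List.pyGetD (PySem.List.pyGetD queries (j : Int) []) 0 0,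
                         PySem.Int.mod (PySem.List.pyGetD (PySem.List.pyGetD queries (j : Int) []) 1 0) n) := rfl
                  rw [hpk, ht1, Prod.ext_iff]
                  exact ⟨hf1, h2⟩)]
            have hkj : seenB rs (cs.set (PySem.Int.mod (PySem.List.pyGetD (PySem.List.pyGetD queries (j : Int) []) 1 0) n).toNat true)
                (pvKey n queries (j : Int)) = true := by
              unfold seenB pvKey
              rw [if_neg (by rw [ht1]; norm_num), pvGetD_nonneg _ _ _ hjx0,
                pvGetD_set _ _ _ _ _ hjxlen, if_pos rfl]
            rw [List.foldl_cons, hstep, List.filter_cons_of_pos hhead, List.foldl_cons, hstepB]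
            rw [List.filter_congr (pvTail_congr n queries hpre j hjlt hvb rs cs rs _ hother hkj)]
            exact ih (by omega) rs _ rc (cc + 1) _ hrs (by rw [List.length_set]; exact hcs)
        · -- neither type 0 nor type 1: nothing happens
          have hvb : pvValidB queries (j : Int) = false := by
            cases h : pvValidB queries (j : Int)
            · rfl
            · exact absurd ((pvValid_iff queries (j : Int)).mp h) (by tauto)
          have hstep : stepA n queries (rc, cc, tot, rs, cs) (j : Int) = (rc, cc, tot, rs, cs) := by
            simp only [stepA]
            rw [if_neg (show ¬ (PySem.List.pyGetD (PySem.List.pyGetD queries (j : Int) []) 0 0 = 0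
                ∧ PySem.List.pyGetD ((rc, cc, tot, rs, cs) : Int × Int × Int × List Bool × List Bool).2.2.2.1
                    (PySem.List.pyGetD (PySem.List.pyGetD queries (j : Int) []) 1 0) false = false) from
              by rintro ⟨h1, -⟩; exact ht0 h1)]
            rw [if_neg (by rintro ⟨h1, -⟩; exact ht1 h1)]
          have hhead : actsB n queries rs cs (j + 1) (j : Int) = false := by
            apply pvHead_stale
            have hlo : lastOcc? n queries (j + 1) (pvKey n queries (j : Int))
                = lastOcc? n queries j (pvKey n queries (j : Int)) := by
              simp only [lastOcc?]
              rw [if_neg (by rw [Bool.and_eq_true]; rintro ⟨h, -⟩; rw [hvb] at h; cases h)]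
            rw [hlo]
            intro hsome
            obtain ⟨-, -, -, hlt⟩ := pvLastOcc_sound n queries j _ _ hsome
            omega
          rw [List.foldl_cons, hstep, List.filter_cons_of_neg (by rw [hhead]; simp)]
          rw [List.filter_congr (pvTail_congr_invalid n queries j hvb rs cs)]
          exact ih (by omega) rs cs rc cc tot hrs hcs

-- ===== VERDICT (by name: the statement is the Claim_ definition above) =====
theorem matrixSumQueries_spec : Claim_equal_matrixSumQueries := by
  intro n queries _ hpre
  unfold Spec_matrixSumQueries matrixSumQueries matrixSumQueries_alt
  have hA : PySem.List.pyRange (PySem.List.len queries - 1) (-1) (-1)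
      = (PySem.List.pyRange 0 ((queries.length : Nat) : Int) 1).reverse := by
    rw [PySem.List.pyRange_neg_one_eq_reverse, show (-1 : Int) + 1 = 0 from rfl,
        show PySem.List.len queries - 1 + 1 = ((queries.length : Nat) : Int) by
          rw [PySem.List.len_eq]; ring]
  rw [hA]
  have hmain := pvMain n queries hpre queries.length (le_refl _)
    (List.replicate n.toNat false) (List.replicate n.toNat false) 0 0 0
    (by simp) (by simp)
  rw [hmain]
  have hfilt : List.filter
      (fun p => actsB n queries (List.replicate n.toNat false) (List.replicate n.toNat false) queries.length p)
      (PySem.List.pyRange 0 ((queries.length : Nat) : Int) 1).reverse = dsurv n queries queries.length := by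
    unfold dsurv
    apply List.filter_congr
    intro p _
    unfold actsB
    have hs : seenB (List.replicate n.toNat false) (List.replicate n.toNat false)
        (pvKey n queries p) = false := by
      unfold seenB
      split <;> exact pvGetD_replicate _ _
    rw [hs]
    simp
  rw [hfilt]
  have hB : (PySem.List.pyRange 0 (PySem.List.len queries) 1).foldl (stepIdx n queries)
      (List.replicate n.toNat none, List.replicate n.toNat none)
      = arrsUpTo n queries queries.length := by
    unfold arrsUpTo
    rw [PySem.List.len_eq]
  simp only [hB, pvSorted_surv n queries hpre]
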